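-- pv_equiv track=rewrite | github.com/tomasrollo/ai_rummy_games | ai_rummy_games/validator.py | _can_form_sequence_with_jokers
-- ===== SOURCE A (Python) =====
-- from typing import List, Tuple, Dict, Set
--
-- def _can_form_sequence_with_jokers(sorted_ranks: List[int], joker_count: int) -> bool:
--     """Check if sorted ranks can form a sequence with available jokers."""
--     if not sorted_ranks:
--         return False
--
--     # Remove duplicates while preserving order
--     unique_ranks = []
--     for rank in sorted_ranks:
--         if rank not in unique_ranks:
--             unique_ranks.append(rank)
--         else:
--             return False  # Duplicate ranks not allowed in sequence
--
--     # Calculate gaps that need to be filled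
--     gaps_needed = 0
--     for i in range(1, len(unique_ranks)):
--         gap = unique_ranks[i] - unique_ranks[i - 1] - 1
--         gaps_needed += gap
--
--     return gaps_needed <= joker_count
-- ===== SOURCE B (Python) =====
-- def _can_form_sequence_with_jokers(sorted_ranks, joker_count):
--     """Check if sorted ranks can form a sequence with available jokers."""
--     n = len(sorted_ranks)
--     if n == 0 or len(set(sorted_ranks)) != n:
--         return False
--     # the per-pair gap sum telescopes to last - first - (n - 1)
--     return sorted_ranks[-1] - sorted_ranks[0] - (n - 1) <= joker_count
-- ===== Notes on version B (the rewrite author's own statement) =====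
-- stated objective: simpler
-- what changed: Replaces the build-a-unique-list-with-membership-scan plus explicit gap-summing loop by a single set-based duplicate test and the closed-form telescoped gap sum last-first-(n-1).
import Mathlib
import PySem

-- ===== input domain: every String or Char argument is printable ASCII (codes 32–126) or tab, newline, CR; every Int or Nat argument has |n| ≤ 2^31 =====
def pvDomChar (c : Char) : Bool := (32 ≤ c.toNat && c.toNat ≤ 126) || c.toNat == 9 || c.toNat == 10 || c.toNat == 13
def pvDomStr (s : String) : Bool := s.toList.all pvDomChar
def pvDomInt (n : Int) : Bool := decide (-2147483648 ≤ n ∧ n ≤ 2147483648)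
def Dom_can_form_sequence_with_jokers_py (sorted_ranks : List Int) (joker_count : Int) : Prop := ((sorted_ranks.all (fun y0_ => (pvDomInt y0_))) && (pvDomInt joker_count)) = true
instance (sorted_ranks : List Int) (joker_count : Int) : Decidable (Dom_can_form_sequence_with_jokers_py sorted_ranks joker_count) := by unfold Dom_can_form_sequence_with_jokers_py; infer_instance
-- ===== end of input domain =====

-- B replaces A's quadratic dedup loop and gap-summing loop by a set-size duplicate test
-- and the closed-form telescoped gap sum last - first - (n-1); objective: simpler.

-- ===== PORT A =====
-- the 'for rank in sorted_ranks' loop: appends to unique_ranks, `none` = the early `return False`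
def pvBuildUnique (l : List Int) (acc : List Int) : Option (List Int) :=
  match l with
  | [] => some acc
  | r :: rest => if r ∈ acc then none else pvBuildUnique rest (acc ++ [r])

def can_form_sequence_with_jokers_py (sorted_ranks : List Int) (joker_count : Int) : Bool :=
  if sorted_ranks = [] then false
  else
    match pvBuildUnique sorted_ranks [] with
    | none => false
    | some unique_ranks =>
      let gaps_needed :=
        (PySem.List.pyRange 1 (unique_ranks.length : Int) 1).foldl
          (fun g i => g + (PySem.List.pyGetD unique_ranks i 0
                            - PySem.List.pyGetD unique_ranks (i - 1) 0 - 1)) 0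
      decide (gaps_needed ≤ joker_count)

-- ===== PORT B =====
def can_form_sequence_with_jokers_py_alt (sorted_ranks : List Int) (joker_count : Int) : Bool :=
  let n := sorted_ranks.length
  if n = 0 ∨ (PySem.Set.ofList sorted_ranks).length ≠ n then false
  else
    decide (PySem.List.pyGetD sorted_ranks (-1) 0 - PySem.List.pyGetD sorted_ranks 0 0
              - ((n : Int) - 1) ≤ joker_count)

-- ===== PRECONDITION & SPEC =====
def Spec_can_form_sequence_with_jokers_py (sorted_ranks : List Int) (joker_count : Int) (out : Bool) : Prop := out = can_form_sequence_with_jokers_py_alt sorted_ranks joker_count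
instance (sorted_ranks : List Int) (joker_count : Int) (out : Bool) : Decidable (Spec_can_form_sequence_with_jokers_py sorted_ranks joker_count out) := by unfold Spec_can_form_sequence_with_jokers_py; infer_instance

-- ===== CLAIM (what is proved, stated in full; the proofs are below) =====
def Claim_equal_can_form_sequence_with_jokers_py : Prop := ∀ (sorted_ranks : List Int) (joker_count : Int), Dom_can_form_sequence_with_jokers_py sorted_ranks joker_count → Spec_can_form_sequence_with_jokers_py sorted_ranks joker_count (can_form_sequence_with_jokers_py sorted_ranks joker_count)

-- ===== LEMMAS AND PROOFS =====

-- A's dedup loop returns the whole list iff it is duplicate-free, else None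
theorem pvBuildUnique_eq (l : List Int) : ∀ (acc : List Int), acc.Nodup →
    pvBuildUnique l acc = if (acc ++ l).Nodup then some (acc ++ l) else none := by
  induction l with
  | nil => intro acc h; simp [pvBuildUnique, h]
  | cons r rest ih =>
    intro acc h
    by_cases hr : r ∈ acc
    · have hnd : ¬ (acc ++ r :: rest).Nodup := by
        intro hd
        rw [List.nodup_append] at hd
        exact hd.2.2 r hr r (by simp) rfl
      simp [pvBuildUnique, hr, hnd]
    · have h2 : (acc ++ [r]).Nodup := by
        simp [List.nodup_append, h]
        intro a ha; rintro rfl; exact hr ha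
      rw [pvBuildUnique, if_neg hr, ih _ h2]
      rw [← List.append_cons]

-- set(xs) has xs's length iff xs has no duplicates
theorem pvSet_len_lt (l : List Int) : ∀ (acc : List Int), acc.Nodup →
    (if (acc ++ l).Nodup then l.foldl PySem.Set.add acc = acc ++ l
     else (l.foldl PySem.Set.add acc).length < acc.length + l.length) := by
  induction l with
  | nil => intro acc h; simp [h]
  | cons r rest ih =>
    intro acc h
    by_cases hr : r ∈ acc
    · have hadd : PySem.Set.add acc r = acc := by
        simp [PySem.Set.add, hr]
      have hnd : ¬ (acc ++ r :: rest).Nodup := by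
        intro hd
        rw [List.nodup_append] at hd
        exact hd.2.2 r hr r (by simp) rfl
      rw [if_neg hnd]
      simp only [List.foldl_cons, hadd]
      have := ih acc h
      split_ifs at this with h3
      · rw [this]
        simp only [List.length_append, List.length_cons]
        omega
      · simp only [List.length_cons]
        omega
    · have hadd : PySem.Set.add acc r = acc ++ [r] := by
        simp [PySem.Set.add, hr]
      have h2 : (acc ++ [r]).Nodup := by
        simp [List.nodup_append, h]
        intro a ha; rintro rfl; exact hr ha
      have := ih (acc ++ [r]) h2
      simp only [List.foldl_cons, hadd, List.append_cons acc r rest]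
      split_ifs at this ⊢ with h3
      · exact this
      · simp only [List.length_append, List.length_cons, List.length_nil] at this ⊢
        omega

theorem pvOfList_iff (l : List Int) :
    ((PySem.Set.ofList l).length = l.length) ↔ l.Nodup := by
  have h := pvSet_len_lt l [] (by simp)
  rw [PySem.Set.ofList_eq_foldl]
  simp at h
  split_ifs at h with h1
  · simp [h, h1]
  · constructor
    · intro hl; omega
    · intro hl; exact absurd hl h1

-- the gap sum telescopes
theorem pvGaps_telescope (u : List Int) : ∀ (n : Nat), n ≤ u.length → 1 ≤ n →
    (PySem.List.pyRange 1 (n : Int) 1).foldl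
      (fun g i => g + (PySem.List.pyGetD u i 0 - PySem.List.pyGetD u (i - 1) 0 - 1)) 0
    = u.getD (n - 1) 0 - u.getD 0 0 - ((n : Int) - 1) := by
  intro n
  induction n with
  | zero => omega
  | succ m ih =>
    intro hle h1
    by_cases hm : 1 ≤ m
    · have hsplit : PySem.List.pyRange 1 ((m + 1 : Nat) : Int) 1
          = PySem.List.pyRange 1 (m : Int) 1 ++ [(m : Int)] := by
        push_cast
        exact PySem.List.pyRange_one_succ_right (by exact_mod_cast hm)
      rw [hsplit, List.foldl_append, ih (by omega) hm]
      simp only [List.foldl_cons, List.foldl_nil]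
      have hg1 : PySem.List.pyGetD u (m : Int) 0 = u.getD m 0 :=
        PySem.List.pyGetD_natCast ..
      have hg2 : PySem.List.pyGetD u ((m : Int) - 1) 0 = u.getD (m - 1) 0 := by
        have : ((m : Int) - 1) = ((m - 1 : Nat) : Int) := by omega
        rw [this]; exact PySem.List.pyGetD_natCast ..
      rw [hg1, hg2]
      push_cast
      ring
    · have hm0 : m = 0 := by omega
      subst hm0
      have : PySem.List.pyRange 1 ((1 : Nat) : Int) 1 = [] :=
        PySem.List.pyRange_one_eq_nil (by norm_num)
      simp

theorem pvGetD_neg_one (u : List Int) (h2 : 1 ≤ u.length) :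
    PySem.List.pyGetD u (-1) 0 = u.getD (u.length - 1) 0 := by
  have hlt : u.length - 1 < u.length := by omega
  have hg := PySem.List.pyGetD_neg_natCast (xs := u) (d := (0 : Int)) (k := 1) (by norm_num) h2
  simp at hg
  rw [hg, List.getD_eq_getElem?_getD, List.getElem?_eq_getElem hlt]
  simp

-- ===== VERDICT (by name: the statement is the Claim_ definition above) =====
theorem can_form_sequence_with_jokers_py_spec : Claim_equal_can_form_sequence_with_jokers_py := by
  intro sr jc _
  unfold Spec_can_form_sequence_with_jokers_py
  unfold can_form_sequence_with_jokers_py can_form_sequence_with_jokers_py_alt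
  by_cases hnil : sr = []
  · subst hnil; simp
  · rw [if_neg hnil]
    have hlen : 1 ≤ sr.length := by
      cases sr with
      | nil => exact absurd rfl hnil
      | cons a l => simp
    by_cases hnd : sr.Nodup
    · have hb := pvBuildUnique_eq sr [] (by simp)
      simp [hnd] at hb
      rw [hb]
      have hset : ¬ (sr.length = 0 ∨ (PySem.Set.ofList sr).length ≠ sr.length) := by
        rintro (h | h)
        · omega
        · exact h ((pvOfList_iff sr).mpr hnd)
      rw [if_neg hset]
      simp only []
      rw [pvGaps_telescope sr sr.length (le_refl _) hlen]
      rw [pvGetD_neg_one sr hlen]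
      have : PySem.List.pyGetD sr 0 0 = sr.getD 0 0 := by
        rw [show ((0 : Int)) = ((0 : Nat) : Int) by norm_num]
        exact PySem.List.pyGetD_natCast ..
      rw [this]
    · have hb := pvBuildUnique_eq sr [] (by simp)
      simp [hnd] at hb
      rw [hb]
      have hset : (sr.length = 0 ∨ (PySem.Set.ofList sr).length ≠ sr.length) := by
        right
        intro h
        exact hnd ((pvOfList_iff sr).mp h)
      rw [if_pos hset]
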